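-- pv_equiv track=rewrite | github.com/edsaac/AOC2023 | day13/day13_part1.py | find_fold
-- ===== SOURCE A (Python) =====
-- def find_fold(puzzle:list[str]):
--     puzzle_size = len(puzzle[0])
--     possible_folds = [[(p[:i], p[i:]) for p in puzzle] for i in range(1, puzzle_size)]
--
--     is_valid_reflection = False
--     most_likely_fold = -1
--     reflected_cols = -1
--
--     for i, fold in enumerate(possible_folds, start=1):
--         mirrored = [(l[::-1], r) for l,r in fold]
--         len_left, len_right = len(mirrored[0][0]), len(mirrored[0][1])
--         len_min = min(len_left, len_right)
--
--         cropped = [(l[:len_min],r[:len_min]) for l,r in mirrored]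
--         is_valid_reflection = all([l==r for l,r in cropped])
--
--         if is_valid_reflection:
--             if len_min > reflected_cols:
--                 most_likely_fold = i
--                 reflected_cols = len_min
--
--     return most_likely_fold, reflected_cols
-- ===== SOURCE B (Python) =====
-- def _row_ok(p, i, m):
--     # does row p reflect around fold i, over m columns on each side
--     # (crops to the available characters, like comparing the cropped slices)?
--     L = len(p)
--     a = min(i, L, m)              # chars available left of the fold (cropped)
--     b = min(max(L - i, 0), m)     # chars available right of the fold (cropped)
--     if a != b:
--         return False
--     e = min(i, L)
--     return all(p[e - 1 - k] == p[i + k] for k in range(a))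
--
--
-- def find_fold(puzzle):
--     W = len(puzzle[0])
--     # scan candidate folds by decreasing reflected width m and return the
--     # first valid one; for a given m the only folds with width m are i = m
--     # and i = W - m, tried in increasing order of i.
--     for m in range(W // 2, 0, -1):
--         if all(_row_ok(p, m, m) for p in puzzle):
--             return m, m
--         if 2 * m != W and all(_row_ok(p, W - m, m) for p in puzzle):
--             return W - m, m
--     return -1, -1
-- ===== Notes on version B (the rewrite author's own statement) =====
-- stated objective: faster
-- what changed: Instead of materialising, reversing and cropping string slices for every fold position and tracking the running best, B enumerates candidate folds in decreasing order of reflected width (for width m only i=m and i=W-m qualify), tests each with in-place character comparisons that short-circuit on the first mismatch, and returns the first valid one.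
import Mathlib
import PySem

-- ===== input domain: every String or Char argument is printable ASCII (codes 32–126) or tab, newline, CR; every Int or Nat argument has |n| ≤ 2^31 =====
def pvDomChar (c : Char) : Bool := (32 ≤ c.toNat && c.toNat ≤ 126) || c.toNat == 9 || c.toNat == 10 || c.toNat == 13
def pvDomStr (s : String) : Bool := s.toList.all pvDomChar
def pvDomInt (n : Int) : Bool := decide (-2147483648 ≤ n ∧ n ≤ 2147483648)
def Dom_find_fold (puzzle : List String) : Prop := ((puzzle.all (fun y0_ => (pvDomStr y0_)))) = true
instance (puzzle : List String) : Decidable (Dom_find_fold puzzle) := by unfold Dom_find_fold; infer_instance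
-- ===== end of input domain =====

-- B replaces A's slice-building scan over every fold position by an early-exit scan over
-- candidate folds in decreasing order of reflected width, testing each with short-circuit
-- character comparisons (objective: faster, measured).

-- ===== PORT A =====
-- strings are ported through List Char (PySem.Chars convention); l[::-1] is List.reverse
-- (exact: PySem.List.slice?_none_none_neg_one), p[:i]/p[i:] are PySem.List.slice.
def find_fold (puzzle : List String) : Int × Int :=
  let rows : List (List Char) := puzzle.map String.toList
  -- puzzle_size = len(puzzle[0])   (IndexError on puzzle = [] → excluded by Pre_)
  let puzzle_size : Int := ((PySem.List.pyGetD rows 0 []).length : Int)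
  -- possible_folds = [[(p[:i], p[i:]) for p in puzzle] for i in range(1, puzzle_size)]
  let possible_folds : List (List (List Char × List Char)) :=
    (PySem.List.pyRange 1 puzzle_size 1).map (fun i =>
      rows.map (fun p => (PySem.List.slice p none (some i), PySem.List.slice p (some i) none)))
  -- for i, fold in enumerate(possible_folds, start=1): …
  let final : Bool × Int × Int :=
    (((PySem.List.pyRange 1 puzzle_size 1).zip possible_folds)).foldl
      (fun (st : Bool × Int × Int) (ifold : Int × List (List Char × List Char)) =>
        let i := ifold.1
        let fold := ifold.2
        let mirrored := fold.map (fun lr => (lr.1.reverse, lr.2))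
        -- len_left, len_right = len(mirrored[0][0]), len(mirrored[0][1])  (mirrored[0]: nonempty under Pre_)
        let len_left : Int := ((PySem.List.pyGetD mirrored 0 ([], [])).1.length : Int)
        let len_right : Int := ((PySem.List.pyGetD mirrored 0 ([], [])).2.length : Int)
        let len_min : Int := min len_left len_right
        let cropped := mirrored.map (fun lr =>
          (PySem.List.slice lr.1 none (some len_min), PySem.List.slice lr.2 none (some len_min)))
        let is_valid_reflection := cropped.all (fun lr => lr.1 == lr.2)
        if is_valid_reflection then
          if len_min > st.2.2 then (is_valid_reflection, i, len_min)
          else (is_valid_reflection, st.2.1, st.2.2)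
        else (is_valid_reflection, st.2.1, st.2.2))
      (false, -1, -1)
  (final.2.1, final.2.2)

-- ===== PORT B =====
-- helper _row_ok of Source B (every index it reads is in range, so List.getD is exact)
def row_ok (p : List Char) (i m : Nat) : Bool :=
  let L := p.length
  let a := min (min i L) m
  let b := min (L - i) m
  if a ≠ b then false
  else
    let e := min i L
    (List.range a).all (fun k => p.getD (e - 1 - k) ' ' == p.getD (i + k) ' ')

-- the 'for m in range(W // 2, 0, -1)' loop of Source B, with its two early returns
def goB (rows : List (List Char)) (W : Nat) : Nat → Int × Int
  | 0 => (-1, -1)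
  | m + 1 =>
    if rows.all (fun p => row_ok p (m + 1) (m + 1)) then (((m + 1 : Nat) : Int), ((m + 1 : Nat) : Int))
    else if decide (2 * (m + 1) ≠ W) && rows.all (fun p => row_ok p (W - (m + 1)) (m + 1)) then
      (((W - (m + 1) : Nat) : Int), ((m + 1 : Nat) : Int))
    else goB rows W m

def find_fold_alt (puzzle : List String) : Int × Int :=
  let rows : List (List Char) := puzzle.map String.toList
  -- W = len(puzzle[0])   (IndexError on puzzle = [] → excluded by Pre_)
  let W : Nat := (PySem.List.pyGetD rows 0 []).length
  goB rows W (W / 2)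

-- ===== PRECONDITION & SPEC =====
-- both programs evaluate puzzle[0], so A raises IndexError exactly on the empty list (as does B)
def Pre_find_fold (puzzle : List String) : Prop := puzzle ≠ []
instance (puzzle : List String) : Decidable (Pre_find_fold puzzle) := by unfold Pre_find_fold; infer_instance

def pvWitness_find_fold : List String := ["##.", "##."]

def Spec_find_fold (puzzle : List String) (out : Int × Int) : Prop := out = find_fold_alt puzzle
instance (puzzle : List String) (out : Int × Int) : Decidable (Spec_find_fold puzzle out) := by unfold Spec_find_fold; infer_instance

-- ===== CLAIM (what is proved, stated in full; the proofs are below) =====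
def Claim_equal_find_fold : Prop := ∀ (puzzle : List String), Dom_find_fold puzzle → Pre_find_fold puzzle → Spec_find_fold puzzle (find_fold puzzle)

-- ===== LEMMAS AND PROOFS =====

-- reflected width of fold i in a grid of width W
def mf (W i : Nat) : Nat := min i (W - i)

-- "fold i is a valid reflection", exactly as A tests it (cropped slice equality per row)
def validB (rows : List (List Char)) (W i : Nat) : Bool :=
  rows.all (fun p => ((p.take i).reverse.take (mf W i)) == ((p.drop i).take (mf W i)))

-- A's best-fold loop, unrolled over i = 1 … j (state = (most_likely_fold, reflected_cols))
def AF (rows : List (List Char)) (W : Nat) : Nat → Int × Int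
  | 0 => (-1, -1)
  | j + 1 =>
    let prev := AF rows W j
    if validB rows W (j + 1) then
      if ((mf W (j + 1) : Nat) : Int) > prev.2 then (((j + 1 : Nat) : Int), ((mf W (j + 1) : Nat) : Int))
      else prev
    else prev

-- B's per-row check is A's cropped slice equality
theorem rowOk_eq (p : List Char) (i m : Nat) :
    row_ok p i m = (((p.take i).reverse.take m) == ((p.drop i).take m)) := by
  have hl : ((p.take i).reverse.take m).length = min (min i p.length) m := by
    simp [Nat.min_comm]
  have hr : ((p.drop i).take m).length = min (p.length - i) m := by
    simp [Nat.min_comm]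
  rw [Bool.eq_iff_iff]
  simp only [row_ok, beq_iff_eq]
  by_cases hab : min (min i p.length) m = min (p.length - i) m
  · simp only [hab, ne_eq, not_true_eq_false, if_false, List.all_eq_true, List.mem_range,
      beq_iff_eq]
    constructor
    · intro hall
      apply List.ext_getElem (by rw [hl, hr, hab])
      intro k hk1 hk2
      have hk : k < min (min i p.length) m := by rw [hl] at hk1; omega
      have h1 : min i p.length - 1 - k < p.length := by omega
      have h2 : i + k < p.length := by rw [hr, ← hab] at hk2; omega
      have := hall k (by omega)
      rw [List.getD_eq_getElem _ _ h1, List.getD_eq_getElem _ _ h2] at this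
      simpa [List.getElem_take, List.getElem_reverse, List.getElem_drop, Nat.min_comm] using this
    · intro heq k hk
      have hk' : k < min (min i p.length) m := by omega
      have h1 : min i p.length - 1 - k < p.length := by omega
      have h2 : i + k < p.length := by omega
      rw [List.getD_eq_getElem _ _ h1, List.getD_eq_getElem _ _ h2]
      have hk1 : k < ((p.take i).reverse.take m).length := by rw [hl]; omega
      have hk2 : k < ((p.drop i).take m).length := by rw [hr, ← hab]; omega
      have := List.getElem_of_eq heq hk1
      simpa [List.getElem_take, List.getElem_reverse, List.getElem_drop, Nat.min_comm] using this
  · simp only [ne_eq, hab, not_false_eq_true, if_true]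
    constructor
    · intro h; simp at h
    · intro heq
      exfalso
      apply hab
      rw [← hl, ← hr, heq]

-- range(a, a+n) over a Nat count
theorem pyRange_add (n : Nat) : ∀ a : Int, PySem.List.pyRange a (a + n) 1 = (List.range n).map (fun k : Nat => a + k) := by
  induction n with
  | zero => intro a; simp [PySem.List.pyRange]
  | succ n ih =>
    intro a
    rw [show ((n+1 : Nat):Int) = (n:Int)+1 by push_cast; ring, show a + ((n:Int)+1) = (a+1) + (n:Int) by ring]
    rw [PySem.List.pyRange_one_cons (by omega), ih (a+1), List.range_succ_eq_map]
    simp only [List.map_cons, List.map_map, Nat.cast_zero, add_zero]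
    congr 1
    apply List.map_congr_left
    intro k _
    simp [Function.comp]
    ring

-- range(1, W) over a Nat width W
theorem pyRange_one_natCast (W : Nat) :
    PySem.List.pyRange 1 (W : Int) 1 = (List.range (W - 1)).map (fun k : Nat => ((1 + k : Nat) : Int)) := by
  cases W with
  | zero => simp [PySem.List.pyRange]
  | succ w =>
    have h := pyRange_add w 1
    rw [show ((w+1 : Nat) : Int) = 1 + (w : Int) by push_cast; ring, h]
    apply List.map_congr_left
    intro k _
    push_cast
    ring

-- the (fold, cols) components of A's loop state evolve independently of its Bool component
theorem foldl_snd_indep {α β γ : Type} (l : List α) (F : β × γ → α → β × γ) (G : γ → α → γ)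
    (h : ∀ st x, x ∈ l → (F st x).2 = G st.2 x) : ∀ (st : β × γ),
    (l.foldl F st).2 = l.foldl G st.2 := by
  induction l with
  | nil => intro st; rfl
  | cons x t ih =>
    intro st
    simp only [List.foldl_cons]
    rw [ih (fun st y hy => h st y (by simp [hy])) (F st x), h st x (by simp)]

-- A's loop over range(1, W) is AF
theorem AF_eq_range_foldl (rows : List (List Char)) (W : Nat) : ∀ (j : Nat),
    (List.range j).foldl
      (fun (pr : Int × Int) (k : Nat) =>
        if validB rows W (1 + k) then
          (if ((mf W (1 + k) : Nat) : Int) > pr.2 then (((1 + k : Nat) : Int), ((mf W (1 + k) : Nat) : Int)) else pr)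
        else pr) (-1, -1) = AF rows W j := by
  intro j
  induction j with
  | zero => rfl
  | succ j ih =>
    rw [List.range_succ, List.foldl_append, ih, List.foldl_cons, List.foldl_nil, AF]
    rw [show 1 + j = j + 1 by omega]

theorem find_fold_eq_AF (puzzle : List String) (r0 : List Char) (rest : List (List Char))
    (h : puzzle.map String.toList = r0 :: rest) :
    find_fold puzzle = AF (r0 :: rest) r0.length (r0.length - 1) := by
  simp only [find_fold, h, PySem.List.pyGetD_zero_cons, pyRange_one_natCast, List.map_map,
    List.zip_map', List.foldl_map]
  rw [← AF_eq_range_foldl (r0 :: rest) r0.length (r0.length - 1)]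
  have heta : ∀ (p : Bool × Int × Int), (p.2.1, p.2.2) = p.2 := fun p => rfl
  rw [heta]
  refine foldl_snd_indep _ _ _ ?_ _
  intro st k hk
  have hkW : 1 + k < r0.length := by simp [List.mem_range] at hk; omega
  simp only [PySem.List.slice_to_natCast, PySem.List.slice_from_natCast, List.map_map,
    Function.comp_def, List.map_cons, PySem.List.pyGetD_zero_cons, List.length_reverse,
    List.length_take, List.length_drop]
  simp only [min_eq_left (le_of_lt hkW)]
  simp only [← Nat.cast_min]
  simp only [PySem.List.slice_to_natCast]
  simp only [validB, mf, List.all_cons, List.all_map, Function.comp_def]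
  split_ifs <;> rfl

theorem find_fold_alt_eq_goB (puzzle : List String) (r0 : List Char) (rest : List (List Char))
    (h : puzzle.map String.toList = r0 :: rest) :
    find_fold_alt puzzle = goB (r0 :: rest) r0.length (r0.length / 2) := by
  simp only [find_fold_alt, h, PySem.List.pyGetD_zero_cons]

-- B's two candidate tests at width m are the validity tests of folds m and W - m
theorem all_rowOk_left (rows : List (List Char)) (W m : Nat) (hm : 2 * m ≤ W) :
    rows.all (fun p => row_ok p m m) = validB rows W m := by
  have : mf W m = m := by unfold mf; omega
  simp [validB, rowOk_eq, this]

theorem all_rowOk_right (rows : List (List Char)) (W m : Nat) (hm : 2 * m ≤ W) :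
    rows.all (fun p => row_ok p (W - m) m) = validB rows W (W - m) := by
  have : mf W (W - m) = m := by unfold mf; omega
  simp [validB, rowOk_eq, this]

-- what A's loop has found after folds 1 … j: nothing valid, or the first fold of maximal width
theorem AF_spec (rows : List (List Char)) (W : Nat) : ∀ (j : Nat),
    (AF rows W j = (-1, -1) ∧ ∀ i, 1 ≤ i → i ≤ j → validB rows W i = false)
    ∨ (∃ i, 1 ≤ i ∧ i ≤ j ∧ validB rows W i = true
        ∧ AF rows W j = ((i : Int), ((mf W i : Nat) : Int))
        ∧ (∀ i', 1 ≤ i' → i' ≤ j → validB rows W i' = true → mf W i' ≤ mf W i)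
        ∧ (∀ i', 1 ≤ i' → i' < i → validB rows W i' = true → mf W i' < mf W i)) := by
  intro j
  induction j with
  | zero => left; exact ⟨rfl, by omega⟩
  | succ j ih =>
    rw [AF]
    by_cases hv : validB rows W (j + 1) = true
    · rcases ih with ⟨he, hall⟩ | ⟨i, h1, h2, h3, h4, h5, h6⟩
      · right
        rw [he]
        refine ⟨j + 1, by omega, le_refl _, hv, ?_, ?_, ?_⟩
        · simp only [hv, if_true]
          rw [if_pos (by omega)]
        · intro i' hi1 hi2 hval
          have he' : i' = j + 1 := by
            by_contra hne
            have h0 := hall i' hi1 (by omega)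
            rw [hval] at h0; simp at h0
          rw [he']
        · intro i' hi1 hi2 hval
          exact absurd (hall i' hi1 (by omega)) (by rw [hval]; simp)
      · rw [h4]
        by_cases hgt : mf W i < mf W (j + 1)
        · right
          refine ⟨j + 1, by omega, le_refl _, hv, ?_, ?_, ?_⟩
          · simp only [hv, if_true]
            rw [if_pos (by exact_mod_cast hgt)]
          · intro i' hi1 hi2 hval
            rcases Nat.lt_or_ge i' (j + 1) with h | h
            · exact le_of_lt (lt_of_le_of_lt (h5 i' hi1 (by omega) hval) hgt)
            · have : i' = j + 1 := by omega
              rw [this]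
          · intro i' hi1 hi2 hval
            exact lt_of_le_of_lt (h5 i' hi1 (by omega) hval) hgt
        · right
          refine ⟨i, h1, by omega, h3, ?_, ?_, h6⟩
          · simp only [hv, if_true]
            rw [if_neg (by omega)]
          · intro i' hi1 hi2 hval
            rcases Nat.lt_or_ge i' (j + 1) with h | h
            · exact h5 i' hi1 (by omega) hval
            · have : i' = j + 1 := by omega
              rw [this]; omega
    · have hv' : validB rows W (j + 1) = false := by simpa using hv
      simp only [hv', Bool.false_eq_true, if_false]
      rcases ih with ⟨he, hall⟩ | ⟨i, h1, h2, h3, h4, h5, h6⟩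
      · left
        refine ⟨he, ?_⟩
        intro i' hi1 hi2
        rcases Nat.lt_or_ge i' (j + 1) with h | h
        · exact hall i' hi1 (by omega)
        · have : i' = j + 1 := by omega
          rw [this]; exact hv'
      · right
        refine ⟨i, h1, by omega, h3, h4, ?_, h6⟩
        intro i' hi1 hi2 hval
        rcases Nat.lt_or_ge i' (j + 1) with h | h
        · exact h5 i' hi1 (by omega) hval
        · have : i' = j + 1 := by omega
          rw [this] at hval; rw [hval] at hv'; simp at hv'

-- what B's loop returns for widths m … 1: nothing valid, or the lower candidate of the
-- largest valid width (preferring i = m' over i = W - m')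
theorem goB_spec (rows : List (List Char)) (W : Nat) : ∀ (m : Nat), 2 * m ≤ W →
    (goB rows W m = (-1, -1) ∧ ∀ m', 1 ≤ m' → m' ≤ m →
        validB rows W m' = false ∧ (2 * m' ≠ W → validB rows W (W - m') = false))
    ∨ (∃ (m' i : Nat), 1 ≤ m' ∧ m' ≤ m ∧ goB rows W m = ((i : Int), ((m' : Nat) : Int))
        ∧ validB rows W i = true ∧ mf W i = m'
        ∧ (i = m' ∨ (i = W - m' ∧ 2 * m' ≠ W ∧ validB rows W m' = false))
        ∧ (∀ m'', m' < m'' → m'' ≤ m →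
            validB rows W m'' = false ∧ (2 * m'' ≠ W → validB rows W (W - m'') = false))) := by
  intro m
  induction m with
  | zero => intro _; left; exact ⟨rfl, by omega⟩
  | succ m ih =>
    intro hm
    rw [goB]
    by_cases h1 : rows.all (fun p => row_ok p (m + 1) (m + 1)) = true
    · right
      refine ⟨m + 1, m + 1, by omega, le_refl _, by rw [if_pos h1], ?_, by unfold mf; omega,
        Or.inl rfl, by omega⟩
      rw [← all_rowOk_left rows W (m+1) hm]; exact h1
    · rw [if_neg h1]
      have hv1 : validB rows W (m + 1) = false := by
        rw [← all_rowOk_left rows W (m+1) hm]; simpa using h1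
      by_cases h2 : (decide (2 * (m + 1) ≠ W) && rows.all (fun p => row_ok p (W - (m + 1)) (m + 1))) = true
      · right
        simp only [Bool.and_eq_true, decide_eq_true_eq] at h2
        refine ⟨m + 1, W - (m + 1), by omega, le_refl _, by rw [if_pos (by simp [h2.1, h2.2])], ?_,
          by unfold mf; omega, Or.inr ⟨rfl, h2.1, hv1⟩, by omega⟩
        rw [← all_rowOk_right rows W (m+1) hm]; exact h2.2
      · rw [if_neg h2]
        have hv2 : 2 * (m + 1) ≠ W → validB rows W (W - (m + 1)) = false := by
          intro hne
          rw [← all_rowOk_right rows W (m+1) hm]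
          by_contra hh
          simp only [Bool.not_eq_false] at hh
          exact h2 (by simp [hne, hh])
        have step : ∀ m', 1 ≤ m' → m' ≤ m + 1 → m' = m + 1 →
            validB rows W m' = false ∧ (2 * m' ≠ W → validB rows W (W - m') = false) := by
          intro m' _ _ he; subst he; exact ⟨hv1, hv2⟩
        rcases ih (by omega) with ⟨he, hall⟩ | ⟨m', i, h1', h2', h3', h4', h5', h6', h7'⟩
        · left
          refine ⟨he, ?_⟩
          intro m' hm1 hm2
          rcases Nat.lt_or_ge m' (m + 1) with h | h
          · exact hall m' hm1 (by omega)
          · exact step m' hm1 hm2 (by omega)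
        · right
          refine ⟨m', i, h1', by omega, h3', h4', h5', h6', ?_⟩
          intro m'' hlt hle
          rcases Nat.lt_or_ge m'' (m + 1) with h | h
          · exact h7' m'' hlt (by omega)
          · exact step m'' (by omega) hle (by omega)

-- every fold index i ∈ [1, W-1] is one of the two candidates of its width mf W i
theorem mf_facts (W i : Nat) (h1 : 1 ≤ i) (h2 : i ≤ W - 1) :
    1 ≤ mf W i ∧ 2 * mf W i ≤ W ∧ (i = mf W i ∨ i = W - mf W i) := by
  unfold mf
  rcases Nat.le_total i (W - i) with h | h
  · rw [min_eq_left h]; omega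
  · rw [min_eq_right h]; omega

theorem AF_eq_goB (rows : List (List Char)) (W : Nat) :
    AF rows W (W - 1) = goB rows W (W / 2) := by
  have hcand : ∀ m', 1 ≤ m' → 2 * m' ≤ W →
      (1 ≤ m' ∧ m' ≤ W - 1 ∧ mf W m' = m') ∧ (1 ≤ W - m' ∧ W - m' ≤ W - 1 ∧ mf W (W - m') = m') := by
    intro m' h1 h2
    unfold mf
    constructor
    · refine ⟨h1, by omega, by omega⟩
    · refine ⟨by omega, by omega, by omega⟩
  rcases AF_spec rows W (W - 1) with ⟨ha, hanone⟩ | ⟨i, hi1, hi2, hiv, haeq, hmax, hfirst⟩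
  · rcases goB_spec rows W (W / 2) (by omega) with ⟨hb, _⟩ | ⟨m', i', h1, h2, h3, h4, h5, h6, h7⟩
    · rw [ha, hb]
    · -- goB found a valid fold i' but A saw none: contradiction
      exfalso
      have hc := hcand m' h1 (by omega)
      rcases h6 with h | ⟨h, _, _⟩
      · rw [h] at h4; rw [hanone m' hc.1.1 hc.1.2.1] at h4; simp at h4
      · rw [h] at h4; rw [hanone (W - m') hc.2.1 hc.2.2.1] at h4; simp at h4
  · rcases goB_spec rows W (W / 2) (by omega) with ⟨hb, hbnone⟩ | ⟨m', i', h1, h2, h3, h4, h5, h6, h7⟩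
    · -- A found a valid fold i but goB saw none: contradiction
      exfalso
      have hf := mf_facts W i hi1 hi2
      have hn := hbnone (mf W i) hf.1 (by omega)
      rcases hf.2.2 with h | h
      · have h0 := hn.1; rw [← h, hiv] at h0; simp at h0
      · by_cases h2m : 2 * mf W i = W
        · have hieq : i = mf W i := by omega
          have h0 := hn.1; rw [← hieq, hiv] at h0; simp at h0
        · have h0 := hn.2 h2m
          rw [← h, hiv] at h0; simp at h0
    · -- both found one: they agree
      have hf := mf_facts W i hi1 hi2
      have hc := hcand m' h1 (by omega)
      have hmm : mf W i = m' := by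
        have hle1 : m' ≤ mf W i := by
          rcases h6 with h | ⟨h, _, _⟩
          · have := hmax m' hc.1.1 hc.1.2.1 (by rw [← h]; exact h4)
            rw [hc.1.2.2] at this; exact this
          · have := hmax (W - m') hc.2.1 hc.2.2.1 (by rw [← h]; exact h4)
            rw [hc.2.2.2] at this; omega
        have hle2 : mf W i ≤ m' := by
          by_contra hgt
          have hn := h7 (mf W i) (by omega) (by omega)
          have hff := mf_facts W i hi1 hi2
          rcases hff.2.2 with h | h
          · have h0 := hn.1; rw [← h, hiv] at h0; simp at h0
          · by_cases h2m : 2 * mf W i = W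
            · have hieq : i = mf W i := by omega
              have h0 := hn.1; rw [← hieq, hiv] at h0; simp at h0
            · have h0 := hn.2 h2m
              rw [← h, hiv] at h0; simp at h0
        omega
      have hii : i = i' := by
        rcases h6 with h | ⟨h, h2m, hvm⟩
        · -- B returned the lower candidate m', which is valid; A cannot sit at W - m' > m'
          by_cases hieq : i = m'
          · omega
          · exfalso
            have hvm' : validB rows W m' = true := by rw [← h]; exact h4
            have : i = W - m' := by
              have := hf.2.2; rw [hmm] at this; omega
            have hlt : m' < i := by
              have h2m : 2 * m' ≠ W := by
                intro hW
                apply hieq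
                omega
              omega
            have := hfirst m' hc.1.1 hlt hvm'
            rw [hc.1.2.2, hmm] at this
            omega
        · -- B returned W - m' because fold m' is invalid; then A sits at W - m' too
          have : i = m' ∨ i = W - m' := by
            have := hf.2.2; rw [hmm] at this; omega
          rcases this with hh | hh
          · exfalso; rw [hh] at hiv; rw [hiv] at hvm; simp at hvm
          · omega
      rw [haeq, h3, hii, h5]

-- ===== VERDICT (by name: the statement is the Claim_ definition above) =====
theorem find_fold_spec : Claim_equal_find_fold := by
  intro puzzle _ hpre
  unfold Spec_find_fold
  obtain ⟨s, rest, rfl⟩ : ∃ s rest, puzzle = s :: rest := by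
    cases puzzle with
    | nil => exact absurd rfl hpre
    | cons s rest => exact ⟨s, rest, rfl⟩
  have h : (s :: rest).map String.toList = s.toList :: rest.map String.toList := rfl
  rw [find_fold_eq_AF _ _ _ h, find_fold_alt_eq_goB _ _ _ h, AF_eq_goB]
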